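-- pv_equiv track=rewrite | github.com/MrBrantCode/unitest_baseline | mut_generate/mist_train_cf/cf_66675/solution.py | custom_concatenate
-- ===== SOURCE A (Python) =====
-- from typing import List
--
-- def custom_concatenate(strings: List[str]) -> str:
--     result = []
--     # Iterate over the strings in reverse order
--     for s in reversed(strings):
--         # Iterate over the characters in each string in reverse order
--         for c in reversed(s):
--             # Skip vowels
--             if c.lower() in "aeiou":
--                 continue
--             # Append non-vowel characters to the result
--             result.append(c)
--     # Join the characters in the result to form a single string and return it
--     return "".join(result)
-- ===== SOURCE B (Python) =====
-- from typing import List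
--
-- def custom_concatenate(strings: List[str]) -> str:
--     # Divide-and-conquer: reverse(concat(xs)) = concat of halves in swapped order,
--     # and the vowel filter distributes over concatenation.
--     def rev_keep(s: str) -> str:
--         if len(s) <= 1:
--             return "" if s and s.lower() in "aeiou" else s
--         m = len(s) // 2
--         return rev_keep(s[m:]) + rev_keep(s[:m])
--
--     def go(lst: List[str]) -> str:
--         if not lst:
--             return ""
--         if len(lst) == 1:
--             return rev_keep(lst[0])
--         m = len(lst) // 2
--         return go(lst[m:]) + go(lst[:m])
--
--     return go(strings)
-- ===== Notes on version B (the rewrite author's own statement) =====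
-- stated objective: alternative
-- what changed: Replaces the nested reversed double-loop with append by a divide-and-conquer recursion: each half of the list (and of each string) is processed recursively and the two halves are concatenated in swapped order, filtering vowels at the single-character base case.
import Mathlib
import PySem

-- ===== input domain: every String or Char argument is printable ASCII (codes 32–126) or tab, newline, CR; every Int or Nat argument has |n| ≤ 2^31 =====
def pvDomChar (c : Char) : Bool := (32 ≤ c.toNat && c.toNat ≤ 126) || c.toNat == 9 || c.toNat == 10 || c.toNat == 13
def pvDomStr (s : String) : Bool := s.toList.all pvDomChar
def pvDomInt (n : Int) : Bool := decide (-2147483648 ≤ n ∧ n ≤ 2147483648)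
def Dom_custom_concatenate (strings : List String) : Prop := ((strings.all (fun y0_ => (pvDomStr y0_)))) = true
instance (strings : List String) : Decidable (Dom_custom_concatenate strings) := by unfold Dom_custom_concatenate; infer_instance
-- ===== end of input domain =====

-- B replaces A's nested reversed loops by a divide-and-conquer recursion (halves
-- concatenated in swapped order, vowel filter at the single-character base case);
-- equivalence is exact on all inputs (A is total, no Pre_ needed).

-- vowel test, identical in both programs: c.lower() in "aeiou"
def pvIsVowel (c : Char) : Bool := (PySem.Chars.lower [c]) ⊆ "aeiou".toList

-- ===== PORT A =====
-- inner loop: for c in reversed(s): if vowel continue else result.append(c)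
def pvInnerA (acc : List Char) (s : String) : List Char :=
  s.toList.reverse.foldl (fun a c => if pvIsVowel c then a else a ++ [c]) acc

def custom_concatenate (strings : List String) : String :=
  String.ofList (strings.reverse.foldl pvInnerA [])

-- ===== PORT B =====
-- rev_keep(s): len(s) <= 1 → "" if vowel else s; else rev_keep(s[m:]) + rev_keep(s[:m])
def pvRevKeep (l : List Char) : List Char :=
  if l.length ≤ 1 then
    (if _h : l = [] then [] else if pvIsVowel (l.headI) then [] else l)
  else
    pvRevKeep (l.drop (l.length / 2)) ++ pvRevKeep (l.take (l.length / 2))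
  termination_by l.length
  decreasing_by
    · simp only [List.length_drop]; omega
    · simp only [List.length_take]; omega

-- go(lst): [] → ""; [s] → rev_keep(s); else go(lst[m:]) + go(lst[:m])
def pvGoB (l : List String) : List Char :=
  if _h : l = [] then []
  else if l.length = 1 then pvRevKeep (l.headI).toList
  else
    pvGoB (l.drop (l.length / 2)) ++ pvGoB (l.take (l.length / 2))
  termination_by l.length
  decreasing_by
    · simp only [List.length_drop]
      have : l.length ≠ 0 := by simpa [List.length_eq_zero_iff] using _h
      omega
    · simp only [List.length_take]
      have : l.length ≠ 0 := by simpa [List.length_eq_zero_iff] using _h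
      omega

def custom_concatenate_alt (strings : List String) : String :=
  String.ofList (pvGoB strings)

-- ===== PRECONDITION & SPEC =====
def Spec_custom_concatenate (strings : List String) (out : String) : Prop := out = custom_concatenate_alt strings
instance (strings : List String) (out : String) : Decidable (Spec_custom_concatenate strings out) := by unfold Spec_custom_concatenate; infer_instance

-- ===== CLAIM (what is proved, stated in full; the proofs are below) =====
def Claim_equal_custom_concatenate : Prop := ∀ (strings : List String), Dom_custom_concatenate strings → Spec_custom_concatenate strings (custom_concatenate strings)

-- ===== LEMMAS AND PROOFS =====

theorem pvInnerA_eq (s : String) (acc : List Char) :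
    pvInnerA acc s = acc ++ (s.toList.reverse.filter (fun c => !(pvIsVowel c))) := by
  unfold pvInnerA
  generalize s.toList.reverse = l
  induction l generalizing acc with
  | nil => simp
  | cons c l ih =>
      by_cases h : pvIsVowel c = true <;> simp [List.foldl, h, ih, List.filter]

theorem pvOuterA_eq (l : List String) (acc : List Char) :
    l.foldl pvInnerA acc = acc ++ (l.map (fun s => s.toList.reverse)).flatten.filter (fun c => !(pvIsVowel c)) := by
  induction l generalizing acc with
  | nil => simp
  | cons s l ih => simp [List.foldl, ih, pvInnerA_eq]

theorem pvRevKeep_eq (l : List Char) :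
    pvRevKeep l = (l.filter (fun c => !(pvIsVowel c))).reverse := by
  unfold pvRevKeep
  split
  · rename_i hle
    match l, hle with
    | [], _ => simp
    | [c], _ =>
        by_cases h : pvIsVowel c = true <;> simp [List.headI, List.filter, h]
  · rename_i hgt
    have h1 := pvRevKeep_eq (l.drop (l.length / 2))
    have h2 := pvRevKeep_eq (l.take (l.length / 2))
    rw [h1, h2, ← List.reverse_append, ← List.filter_append,
        List.take_append_drop]
  termination_by l.length
  decreasing_by
    · simp only [List.length_drop]; omega
    · simp only [List.length_take]; omega

theorem pvGoB_eq (l : List String) :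
    pvGoB l = ((l.map String.toList).flatten.filter (fun c => !(pvIsVowel c))).reverse := by
  unfold pvGoB
  split
  · rename_i h; subst h; simp
  · split
    · rename_i hne h1
      match l, h1 with
      | [s], _ => simp [pvRevKeep_eq, List.headI]
    · rename_i hne h1
      have g1 := pvGoB_eq (l.drop (l.length / 2))
      have g2 := pvGoB_eq (l.take (l.length / 2))
      rw [g1, g2, ← List.reverse_append, ← List.filter_append, ← List.flatten_append,
          ← List.map_append, List.take_append_drop]
  termination_by l.length
  decreasing_by
    all_goals
      simp only [List.length_drop, List.length_take]
      have hne' : l ≠ [] := by assumption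
      have : l.length ≠ 0 := by simpa [List.length_eq_zero_iff] using hne'
      omega

-- ===== VERDICT (by name: the statement is the Claim_ definition above) =====
theorem custom_concatenate_spec : Claim_equal_custom_concatenate := by
  intro strings _
  unfold Spec_custom_concatenate custom_concatenate custom_concatenate_alt
  rw [pvOuterA_eq, pvGoB_eq]
  simp [← List.filter_reverse, List.reverse_flatten, List.map_reverse, Function.comp_def]
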